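-- pv_equiv track=rewrite | github.com/davidmgmeyer/eval-dashboard | utils/taxonomy.py | get_parent_column
-- ===== SOURCE A (Python) =====
-- from typing import Optional
--
-- TAXONOMY_LEVELS = {
--     'Risk': ['Risk L1', 'Risk L2', 'Risk L3'],
--     'Attack': ['Attack L1', 'Attack L2', 'Attack L3'],
-- }
--
-- def get_parent_column(column: str) -> Optional[str]:
--     """Get the parent column for a given taxonomy column.
--
--     Args:
--         column: Current column name (e.g., 'Risk L2')
--
--     Returns:
--         Parent column name or None if at top level
--     """
--     for taxonomy_type, levels in TAXONOMY_LEVELS.items():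
--         if column in levels:
--             idx = levels.index(column)
--             if idx > 0:
--                 return levels[idx - 1]
--             return None
--     return None
-- ===== SOURCE B (Python) =====
-- from typing import Optional
--
-- TAXONOMY_LEVELS = {
--     'Risk': ['Risk L1', 'Risk L2', 'Risk L3'],
--     'Attack': ['Attack L1', 'Attack L2', 'Attack L3'],
-- }
--
-- # Flat parent table built once: each level name -> its parent (None for L1 levels).
-- PARENT_MAP = {}
-- for _levels in TAXONOMY_LEVELS.values():
--     for _i, _name in enumerate(_levels):
--         PARENT_MAP[_name] = _levels[_i - 1] if _i > 0 else None
--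
-- def get_parent_column(column: str) -> Optional[str]:
--     return PARENT_MAP.get(column)
-- ===== Notes on version B (the rewrite author's own statement) =====
-- stated objective: simpler
-- what changed: Replaces the per-call scan over TAXONOMY_LEVELS (membership test plus .index arithmetic) with a flat parent dictionary built once at import time, making the function a single table lookup.
import Mathlib
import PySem

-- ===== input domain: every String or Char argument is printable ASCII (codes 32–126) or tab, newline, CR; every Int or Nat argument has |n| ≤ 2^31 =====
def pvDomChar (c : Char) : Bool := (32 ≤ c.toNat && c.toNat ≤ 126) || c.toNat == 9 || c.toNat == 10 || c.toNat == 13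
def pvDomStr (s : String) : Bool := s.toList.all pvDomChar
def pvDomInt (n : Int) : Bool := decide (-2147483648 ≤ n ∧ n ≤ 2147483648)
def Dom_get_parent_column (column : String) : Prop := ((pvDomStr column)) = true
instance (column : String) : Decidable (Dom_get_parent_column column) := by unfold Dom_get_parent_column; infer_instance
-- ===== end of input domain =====

-- B replaces A's per-call scan with a parent table built once; equivalence of return values is proved.

-- ===== PORT A =====
-- dict literal with distinct keys; Dict.mk is exact here
def pvTAXONOMY_LEVELS : PySem.Dict String (List String) :=
  PySem.Dict.mk [("Risk", ["Risk L1", "Risk L2", "Risk L3"]),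
                 ("Attack", ["Attack L1", "Attack L2", "Attack L3"])]

-- the for-loop over TAXONOMY_LEVELS.items() with early return
def pvLoopA (column : String) : List (String × List String) → Option String
  | [] => none
  | (_, levels) :: rest =>
    if levels.contains column then
      match PySem.List.index? levels column with
      | some idx => if idx > 0 then PySem.List.pyGet? levels ((idx : Int) - 1) else none
      | none => none   -- unreachable: guarded by the membership test
    else pvLoopA column rest

def get_parent_column (column : String) : Option String :=
  pvLoopA column pvTAXONOMY_LEVELS.items

-- ===== PORT B =====
-- PARENT_MAP built once by iterating the taxonomy lists, as in Source B
def pvPARENT_MAP : PySem.Dict String (Option String) :=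
  pvTAXONOMY_LEVELS.values.foldl
    (fun d levels =>
      (PySem.List.enumerate levels).foldl
        (fun d (p : Int × String) =>
          d.insert p.2 (if p.1 > 0 then PySem.List.pyGet? levels (p.1 - 1) else none))
        d)
    PySem.Dict.empty

def get_parent_column_alt (column : String) : Option String :=
  PySem.Dict.getD pvPARENT_MAP column none

-- ===== PRECONDITION & SPEC =====
def Spec_get_parent_column (column : String) (out : Option String) : Prop := out = get_parent_column_alt column
instance (column : String) (out : Option String) : Decidable (Spec_get_parent_column column out) := by unfold Spec_get_parent_column; infer_instance

-- ===== CLAIM (what is proved, stated in full; the proofs are below) =====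
def Claim_equal_get_parent_column : Prop := ∀ (column : String), Dom_get_parent_column column → Spec_get_parent_column column (get_parent_column column)

-- ===== LEMMAS AND PROOFS =====

lemma pvPARENT_MAP_eq :
    pvPARENT_MAP = PySem.Dict.mk
      [("Risk L1", none), ("Risk L2", some "Risk L1"), ("Risk L3", some "Risk L2"),
       ("Attack L1", none), ("Attack L2", some "Attack L1"), ("Attack L3", some "Attack L2")] := by
  decide

-- ===== VERDICT (by name: the statement is the Claim_ definition above) =====
theorem get_parent_column_spec : Claim_equal_get_parent_column := by
  unfold Claim_equal_get_parent_column
  intro column _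
  unfold Spec_get_parent_column get_parent_column get_parent_column_alt
  by_cases h1 : column = "Risk L1"
  · subst h1; decide
  by_cases h2 : column = "Risk L2"
  · subst h2; decide
  by_cases h3 : column = "Risk L3"
  · subst h3; decide
  by_cases h4 : column = "Attack L1"
  · subst h4; decide
  by_cases h5 : column = "Attack L2"
  · subst h5; decide
  by_cases h6 : column = "Attack L3"
  · subst h6; decide
  rw [pvPARENT_MAP_eq]
  show pvLoopA column pvTAXONOMY_LEVELS.items = _
  rw [pvTAXONOMY_LEVELS]
  rw [show (PySem.Dict.mk [("Risk", ["Risk L1", "Risk L2", "Risk L3"]),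
        ("Attack", ["Attack L1", "Attack L2", "Attack L3"])]).items
      = [("Risk", ["Risk L1", "Risk L2", "Risk L3"]),
         ("Attack", ["Attack L1", "Attack L2", "Attack L3"])] from rfl]
  rw [pvLoopA, if_neg (by simp; exact ⟨h1, h2, h3⟩), pvLoopA, if_neg (by simp; exact ⟨h4, h5, h6⟩), pvLoopA]
  simp [PySem.Dict.getD, PySem.Dict.get?,
        Ne.symm h1, Ne.symm h2, Ne.symm h3, Ne.symm h4, Ne.symm h5, Ne.symm h6]
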